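-- pv_equiv track=rewrite | github.com/dekkowka/pythonProject11 | mod2/task5.py | get_domain_hierarchy
-- ===== SOURCE A (Python) =====
-- def get_domain_hierarchy(url):
--     parts = url.split('.')
--     parts.reverse()
--     domain_hierarchy = []
--     for i in range(len(parts)):
--         domain = '.'.join(parts[:i+1])
--         domain_hierarchy.append(domain)
--     return domain_hierarchy
-- ===== SOURCE B (Python) =====
-- def get_domain_hierarchy(url):
--     out = []
--     acc = None
--     for p in reversed(url.split('.')):
--         acc = p if acc is None else acc + '.' + p
--         out.append(acc)
--     return out
-- ===== Notes on version B (the rewrite author's own statement) =====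
-- stated objective: idiomatic
-- what changed: B folds once over the reversed labels maintaining a single growing accumulator string, instead of A's re-slicing the list and re-joining the prefix from scratch at every index.
import Mathlib
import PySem

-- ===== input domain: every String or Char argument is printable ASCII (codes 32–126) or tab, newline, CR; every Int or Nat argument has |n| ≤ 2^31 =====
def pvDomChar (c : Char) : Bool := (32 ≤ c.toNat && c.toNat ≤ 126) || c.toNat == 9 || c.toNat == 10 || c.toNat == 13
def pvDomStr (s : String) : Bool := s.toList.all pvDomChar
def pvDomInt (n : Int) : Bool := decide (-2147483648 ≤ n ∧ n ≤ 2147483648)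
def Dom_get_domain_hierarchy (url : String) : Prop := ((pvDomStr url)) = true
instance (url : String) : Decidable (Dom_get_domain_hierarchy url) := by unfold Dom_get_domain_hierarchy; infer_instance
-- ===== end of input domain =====

-- B replaces A's per-index re-slice-and-re-join with a single pass keeping one growing accumulator string (idiomatic; return value only, no mutation observable).

-- ===== PORT A =====
-- parts = url.split('.'); parts.reverse(); for i in range(len(parts)): append('.'.join(parts[:i+1]))
def get_domain_hierarchy (url : String) : List String :=
  let parts := ((PySem.Str.split? url ".").getD []).reverse
  (List.range parts.length).foldl
    (fun acc (i : Nat) => acc ++ [PySem.Str.join "." (PySem.List.slice parts none (some ((i : Int) + 1)))]) []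

-- ===== PORT B =====
-- for p in reversed(url.split('.')): acc = p if acc is None else acc + '.' + p; out.append(acc)
def ghAltLoop (ps : List String) (acc : Option String) (out : List String) : List String :=
  match ps with
  | [] => out
  | p :: rest =>
    let acc' := match acc with
      | none => p
      | some a => a ++ "." ++ p
    ghAltLoop rest (some acc') (out ++ [acc'])

def get_domain_hierarchy_alt (url : String) : List String :=
  ghAltLoop ((PySem.Str.split? url ".").getD []).reverse none []

-- ===== PRECONDITION & SPEC =====
def Spec_get_domain_hierarchy (url : String) (out : List String) : Prop := out = get_domain_hierarchy_alt url
instance (url : String) (out : List String) : Decidable (Spec_get_domain_hierarchy url out) := by unfold Spec_get_domain_hierarchy; infer_instance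

-- ===== CLAIM (what is proved, stated in full; the proofs are below) =====
def Claim_equal_get_domain_hierarchy : Prop := ∀ (url : String), Dom_get_domain_hierarchy url → Spec_get_domain_hierarchy url (get_domain_hierarchy url)

-- ===== LEMMAS AND PROOFS =====

-- `step acc pre` is the accumulator value after B has absorbed the labels `pre` starting from state `acc`.
def ghStep (acc : Option String) (pre : List String) : String :=
  match acc with
  | none => PySem.Str.join "." pre
  | some a => a ++ "." ++ PySem.Str.join "." pre

theorem join_cons_str (p : String) (l : List String) (h : l ≠ []) :
    PySem.Str.join "." (p :: l) = p ++ "." ++ PySem.Str.join "." l := by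
  rw [← String.toList_inj]
  obtain ⟨q, t, rfl⟩ : ∃ q t, l = q :: t := by
    cases l with
    | nil => exact absurd rfl h
    | cons q t => exact ⟨q, t, rfl⟩
  simp [PySem.Str.toList_join, PySem.Chars.join_cons_cons]

theorem join_single_str (p : String) : PySem.Str.join "." [p] = p := by
  rw [← String.toList_inj]
  simp [PySem.Str.toList_join, PySem.Chars.join_singleton]

theorem ghStep_cons (acc : Option String) (p : String) (l : List String) (h : l ≠ []) :
    ghStep acc (p :: l) = ghStep (some (ghStep acc [p])) l := by
  cases acc with
  | none =>
    simp only [ghStep, join_cons_str p l h, join_single_str]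
  | some a =>
    simp only [ghStep, join_cons_str p l h, join_single_str, String.append_assoc]

theorem ghAltLoop_eq (ps : List String) : ∀ (acc : Option String) (out : List String),
    ghAltLoop ps acc out =
      out ++ (List.range ps.length).map (fun i => ghStep acc (ps.take (i + 1))) := by
  induction ps with
  | nil => intro acc out; simp [ghAltLoop]
  | cons p rest ih =>
    intro acc out
    have hacc' : (match acc with | none => p | some a => a ++ "." ++ p) = ghStep acc [p] := by
      cases acc with
      | none => simp [ghStep, join_single_str]
      | some a => simp [ghStep, join_single_str]
    rw [ghAltLoop.eq_def]
    simp only []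
    rw [hacc', ih]
    rw [List.length_cons, List.range_succ_eq_map]
    simp only [List.map_cons, List.map_map]
    have : List.map ((fun i => ghStep acc ((p :: rest).take (i + 1))) ∘ Nat.succ) (List.range rest.length)
        = List.map (fun i => ghStep (some (ghStep acc [p])) (rest.take (i + 1))) (List.range rest.length) := by
      apply List.map_congr_left
      intro j hj
      have hjlt : j < rest.length := List.mem_range.mp hj
      have hne : rest.take (j + 1) ≠ [] := by
        cases rest with
        | nil => exact absurd hjlt (by simp)
        | cons q t => simp [List.take]
      simp only [Function.comp, Nat.succ_eq_add_one, List.take_succ_cons]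
      exact ghStep_cons acc p (rest.take (j + 1)) hne
    rw [this]
    simp [List.take]

-- ===== VERDICT (by name: the statement is the Claim_ definition above) =====
theorem get_domain_hierarchy_spec : Claim_equal_get_domain_hierarchy := by
  intro url _
  unfold Spec_get_domain_hierarchy get_domain_hierarchy get_domain_hierarchy_alt
  set ps := ((PySem.Str.split? url ".").getD []).reverse with hps
  rw [PySem.List.foldl_append_singleton_eq_map
        (fun i : ℕ => PySem.Str.join "." (PySem.List.slice ps none (some ((i : Int) + 1))))
        (List.range ps.length) [],
      ghAltLoop_eq]
  simp only [List.nil_append]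
  apply List.map_congr_left
  intro i hi
  have hilt : i < ps.length := List.mem_range.mp hi
  have : ((i : Int) + 1) = ((i + 1 : Nat) : Int) := by push_cast; ring
  rw [this, PySem.List.slice_to_natCast]
  rfl
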